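-- pv_equiv track=rewrite | github.com/jbw3/file_filter | file_filter.py | split_line_qualifier
-- ===== SOURCE A (Python) =====
-- def split_line_qualifier(line: str, delimiter: str, qualifier: str) -> tuple[list[str], list[bool]]:
--     items: list[str] = []
--     qualified: list[bool] = []
--     start = 0
--     line_end = len(line)
--     q_len = len(qualifier)
--     qual_del = qualifier + delimiter
--     qual_del_len = len(qual_del)
--     while start < line_end:
--         if line[start:start+q_len] == qualifier:
--             in_qual = True
--             start += 1
--             end = line.find(qualifier, start + 1)
--             while end < line_end - 1 and line[end + 1] != delimiter:
--                 end = line.find(qualifier, end + 1)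
--             inc = qual_del_len
--         else:
--             in_qual = False
--             end = line.find(delimiter, start + 1)
--             inc = len(delimiter)
--         if end < 0:
--             end = line_end
--
--         items.append(line[start:end])
--         qualified.append(in_qual)
--         start = end + inc
--
--     return items, qualified
-- ===== SOURCE B (Python) =====
-- # B: single left-to-right character scan with an explicit in-field index, instead of
-- # A's str.find jumps.  A field never starts empty (a delimiter at a field start is
-- # content, as in A); a qualified field closes at a qualifier followed by the
-- # delimiter or the end of the line.
-- def split_line_qualifier(line: str, delimiter: str, qualifier: str) -> tuple[list[str], list[bool]]:
--     items: list[str] = []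
--     qualified: list[bool] = []
--     i = 0
--     n = len(line)
--     q_len = len(qualifier)
--     d_len = len(delimiter)
--     while i < n:
--         if q_len and line.startswith(qualifier, i):
--             j = i + q_len
--             field: list[str] = []
--             while j < n and not (line.startswith(qualifier, j)
--                                  and (j + q_len == n or line.startswith(delimiter, j + q_len))):
--                 field.append(line[j])
--                 j += 1
--             items.append(''.join(field))
--             qualified.append(True)
--             i = j + q_len + d_len
--         else:
--             j = i + 1
--             while j < n and not line.startswith(delimiter, j):
--                 j += 1
--             items.append(line[i:j])
--             qualified.append(False)
--             i = j + d_len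
--     return items, qualified
-- ===== Notes on version B (the rewrite author's own statement) =====
-- stated objective: alternative
-- what changed: B replaces A's str.find jumps (with their restart-from-0 rescans) by a single left-to-right character scan with an index and explicit field/closing-qualifier tests; same O(n) cost, no find calls.
-- outside the precondition, e.g. on split_line_qualifier('abc', ',', ''): A returns (['b'], [True]), B returns (['abc'], [False]); on split_line_qualifier('"",""', ',', '"'): A returns (['","'], [True]), B returns (['', ''], [True, True]); on split_line_qualifier('"a"', ';;', '"'): A returns (['a'], [True]), B returns (['a'], [True])
import Mathlib
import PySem

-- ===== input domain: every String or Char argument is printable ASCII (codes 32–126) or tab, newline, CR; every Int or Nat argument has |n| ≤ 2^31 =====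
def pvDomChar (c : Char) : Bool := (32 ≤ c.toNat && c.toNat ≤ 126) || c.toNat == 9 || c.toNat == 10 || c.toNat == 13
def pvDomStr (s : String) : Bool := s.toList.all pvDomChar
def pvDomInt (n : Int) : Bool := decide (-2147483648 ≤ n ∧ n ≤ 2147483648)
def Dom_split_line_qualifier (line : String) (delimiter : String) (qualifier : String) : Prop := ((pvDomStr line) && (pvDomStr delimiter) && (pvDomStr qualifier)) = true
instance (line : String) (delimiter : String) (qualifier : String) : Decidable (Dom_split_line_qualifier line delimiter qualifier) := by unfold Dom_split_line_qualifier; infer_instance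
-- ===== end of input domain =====

-- B replaces A's str.find jumps by a single left-to-right character scan (objective: alternative
-- decomposition of the same cost); equivalence is proved on Pre_, the well-formed single-character
-- delimiter/qualifier inputs described there.

-- ===== PORT A =====
-- the inner `while end < line_end - 1 and line[end+1] != delimiter` loop of A; Python's loop is
-- unbounded (A diverges on some inputs), so the port carries a fuel that the proofs show is never
-- exhausted on Pre_ inputs
def pvA_inner (cs dl ql : List Char) : Nat → Int → Int
  | 0, e => e
  | Nat.succ fuel, e =>
    if e < (cs.length : Int) - 1 then
      if (PySem.List.pyGet? cs (e + 1)).map (fun c => [c]) ≠ some dl then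
        pvA_inner cs dl ql fuel (PySem.Chars.findFrom cs ql (e + 1))
      else e
    else e

def pvA_loop (cs dl ql : List Char) : Nat → Int → List String → List Bool → List String × List Bool
  | 0, _, items, quals => (items, quals)
  | Nat.succ fuel, start, items, quals =>
    if start < (cs.length : Int) then
      if PySem.Chars.slice cs (some start) (some (start + (ql.length : Int))) = ql then
        let s := start + 1
        let e1 := pvA_inner cs dl ql (2 * cs.length + 4) (PySem.Chars.findFrom cs ql (s + 1))
        let e2 := if e1 < 0 then (cs.length : Int) else e1
        pvA_loop cs dl ql fuel (e2 + ((ql ++ dl).length : Int))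
          (items ++ [String.ofList (PySem.Chars.slice cs (some s) (some e2))]) (quals ++ [true])
      else
        let e0 := PySem.Chars.findFrom cs dl (start + 1)
        let e2 := if e0 < 0 then (cs.length : Int) else e0
        pvA_loop cs dl ql fuel (e2 + (dl.length : Int))
          (items ++ [String.ofList (PySem.Chars.slice cs (some start) (some e2))]) (quals ++ [false])
    else (items, quals)

def split_line_qualifier (line : String) (delimiter : String) (qualifier : String) : List String × List Bool :=
  pvA_loop line.toList delimiter.toList qualifier.toList (line.toList.length + 2) 0 [] []

-- ===== PORT B =====
-- scan from j for the first position where the delimiter starts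
def pvB_delim (cs dl : List Char) (j : Nat) : Nat :=
  if h : j < cs.length then
    if PySem.Chars.startswith (cs.drop j) dl then j else pvB_delim cs dl (j + 1)
  else j
termination_by cs.length - j

-- scan from j for the first closing qualifier (a qualifier followed by the delimiter or line end)
def pvB_close (cs dl ql : List Char) (j : Nat) : Nat :=
  if h : j < cs.length then
    if PySem.Chars.startswith (cs.drop j) ql ∧
        (j + ql.length = cs.length ∨ PySem.Chars.startswith (cs.drop (j + ql.length)) dl) then j
    else pvB_close cs dl ql (j + 1)
  else j
termination_by cs.length - j

-- the two scanners never move backwards (cited by pvB_loop's termination proof)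
theorem pvB_delim_ge (cs dl : List Char) (j : Nat) : j ≤ pvB_delim cs dl j := by
  unfold pvB_delim
  split
  · split
    · exact le_refl j
    · have := pvB_delim_ge cs dl (j + 1); omega
  · exact le_refl j
termination_by cs.length - j

theorem pvB_close_ge (cs dl ql : List Char) (j : Nat) : j ≤ pvB_close cs dl ql j := by
  unfold pvB_close
  split
  · split
    · exact le_refl j
    · have := pvB_close_ge cs dl ql (j + 1); omega
  · exact le_refl j
termination_by cs.length - j

def pvB_loop (cs dl ql : List Char) (i : Nat) (items : List String) (quals : List Bool) :
    List String × List Bool :=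
  if h : i < cs.length then
    if hb : ql.length ≠ 0 ∧ PySem.Chars.startswith (cs.drop i) ql then
      let j := pvB_close cs dl ql (i + ql.length)
      pvB_loop cs dl ql (j + ql.length + dl.length)
        (items ++ [String.ofList (List.take (j - (i + ql.length)) (List.drop (i + ql.length) cs))])
        (quals ++ [true])
    else
      let j := pvB_delim cs dl (i + 1)
      pvB_loop cs dl ql (j + dl.length)
        (items ++ [String.ofList (List.take (j - i) (List.drop i cs))])
        (quals ++ [false])
  else (items, quals)
termination_by cs.length - i
decreasing_by
  · have := pvB_close_ge cs dl ql (i + ql.length); have := hb.1; omega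
  · have := pvB_delim_ge cs dl (i + 1); omega

def split_line_qualifier_alt (line : String) (delimiter : String) (qualifier : String) :
    List String × List Bool :=
  pvB_loop line.toList delimiter.toList qualifier.toList 0 [] []

-- ===== PRECONDITION & SPEC =====
-- p is a position at which a qualified field could open: the qualifier starts there, at the
-- beginning of the line or right after a delimiter
def pvOpens (cs dl ql : List Char) (p : Nat) : Prop :=
  ql <+: cs.drop p ∧ (p = 0 ∨ (dl.length ≤ p ∧ dl <+: cs.drop (p - dl.length)))

-- r closes a qualified field: the qualifier starts there, at the last position or followed by the delimiter
def pvGoodAt (cs dl ql : List Char) (r : Nat) : Prop :=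
  ql <+: cs.drop r ∧ (r = cs.length - 1 ∨ dl <+: cs.drop (r + 1))

-- Pre_ excludes the empty qualifier and lines on which a qualified field opens with a multi-character
-- or empty delimiter/qualifier, opens as an empty field (immediately closed at p+1), or never closes
-- (and the line does not start with the delimiter): there A's `start += 1` / `find(qualifier, start+1)` /
-- char-vs-string comparisons make it diverge or return accidental values.
def Pre_split_line_qualifier (line : String) (delimiter : String) (qualifier : String) : Prop :=
  qualifier.toList ≠ [] ∧
  ∀ p < line.toList.length, pvOpens line.toList delimiter.toList qualifier.toList p →
    delimiter.toList.length = 1 ∧ qualifier.toList.length = 1 ∧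
    ¬ pvGoodAt line.toList delimiter.toList qualifier.toList (p + 1) ∧
    (delimiter.toList <+: line.toList ∨
      ∃ r < line.toList.length, p + 2 ≤ r ∧ pvGoodAt line.toList delimiter.toList qualifier.toList r)

instance (line : String) (delimiter : String) (qualifier : String) :
    Decidable (Pre_split_line_qualifier line delimiter qualifier) := by
  unfold Pre_split_line_qualifier pvOpens pvGoodAt
  exact instDecidableAnd (dq := Nat.decidableBallLT _ _)

def pvWitness_split_line_qualifier : String × String × String := ("\"ab\",c", ",", "\"")

def Spec_split_line_qualifier (line : String) (delimiter : String) (qualifier : String)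
    (out : List String × List Bool) : Prop := out = split_line_qualifier_alt line delimiter qualifier
instance (line : String) (delimiter : String) (qualifier : String) (out : List String × List Bool) :
    Decidable (Spec_split_line_qualifier line delimiter qualifier out) := by
  unfold Spec_split_line_qualifier; infer_instance

-- ===== CLAIM (what is proved, stated in full; the proofs are below) =====
def Claim_equal_split_line_qualifier : Prop := ∀ (line : String) (delimiter : String) (qualifier : String), Dom_split_line_qualifier line delimiter qualifier → Pre_split_line_qualifier line delimiter qualifier → Spec_split_line_qualifier line delimiter qualifier (split_line_qualifier line delimiter qualifier)

-- ===== LEMMAS AND PROOFS =====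

theorem pv_single_prefix {a : Char} {l : List Char} : [a] <+: l ↔ l.head? = some a := by
  cases l with
  | nil => simp
  | cons b t => simp [List.cons_prefix_cons, eq_comm]

theorem pv_prefix_drop {a : Char} {cs : List Char} {j : Nat} :
    [a] <+: cs.drop j ↔ cs[j]? = some a := by
  rw [pv_single_prefix, List.head?_drop]

theorem pv_infix_of_prefix_drop {sub cs : List Char} {k m : Nat} (hkm : k ≤ m)
    (h : sub <+: cs.drop m) : sub <:+: cs.drop k := by
  have hm : cs.drop m = (cs.drop k).drop (m - k) := by
    rw [List.drop_drop]; congr 1; omega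
  rw [hm] at h
  exact h.isInfix.trans (List.drop_suffix _ _).isInfix


theorem pv_findFrom_spec (cs sub : List Char) (k : Nat) (hk : k ≤ cs.length) :
    (PySem.Chars.findFrom cs sub (k : Int) < 0 →
      PySem.Chars.findFrom cs sub (k : Int) = -1 ∧ ∀ m, k ≤ m → ¬ sub <+: cs.drop m) ∧
    (0 ≤ PySem.Chars.findFrom cs sub (k : Int) →
      k ≤ (PySem.Chars.findFrom cs sub (k : Int)).toNat ∧
      (PySem.Chars.findFrom cs sub (k : Int)).toNat ≤ cs.length ∧
      sub <+: cs.drop (PySem.Chars.findFrom cs sub (k : Int)).toNat ∧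
      ∀ m, k ≤ m → m < (PySem.Chars.findFrom cs sub (k : Int)).toNat → ¬ sub <+: cs.drop m) := by
  constructor
  · intro hneg
    have hne : PySem.Chars.findFrom cs sub (k : Int) = -1 := by
      rw [PySem.Chars.findFrom_natCast cs sub k hk] at hneg ⊢
      split at hneg
      · simp_all
      · have := PySem.Chars.neg_one_le_find (cs.drop k) sub
        rename_i hne
        omega
    refine ⟨hne, ?_⟩
    intro m hm hpre
    rw [PySem.Chars.findFrom_natCast_eq_neg_one_iff cs sub k hk] at hne
    exact hne (pv_infix_of_prefix_drop hm hpre)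
  · intro hpos
    have hfle : PySem.Chars.findFrom cs sub (k : Int) ≤ (cs.length : Int) := by
      rw [PySem.Chars.findFrom_natCast cs sub k hk]
      split
      · omega
      · have h1 := PySem.Chars.find_le_length (cs.drop k) sub
        rw [List.length_drop] at h1
        omega
    have hne : PySem.Chars.findFrom cs sub (k : Int) ≠ -1 := by omega
    obtain ⟨h1, h2, h3⟩ := PySem.Chars.findFrom_natCast_spec cs sub k hk hne
    exact ⟨by omega, by omega, h2, h3⟩

theorem pv_findFrom_past (cs sub : List Char) (k : Int) (hk : (cs.length : Int) < k) :
    PySem.Chars.findFrom cs sub k = -1 := by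
  simp only [PySem.Chars.findFrom]
  have h0 : ¬ k < 0 := by omega
  simp only [if_neg h0]
  rw [if_pos hk]

-- ----- B-side scanner characterizations -----

theorem pvB_delim_spec (cs dl : List Char) (j : Nat) (hj : j ≤ cs.length) :
    j ≤ pvB_delim cs dl j ∧ pvB_delim cs dl j ≤ cs.length ∧
    (pvB_delim cs dl j < cs.length → dl <+: cs.drop (pvB_delim cs dl j)) ∧
    (∀ m, j ≤ m → m < pvB_delim cs dl j → ¬ dl <+: cs.drop m) := by
  unfold pvB_delim
  split
  · rename_i h
    by_cases hs : PySem.Chars.startswith (cs.drop j) dl = true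
    · rw [if_pos hs]
      exact ⟨le_refl _, by omega, fun _ => (PySem.Chars.startswith_iff _ _).1 hs,
        fun m h1 h2 => by omega⟩
    · rw [if_neg hs]
      have IH := pvB_delim_spec cs dl (j + 1) (by omega)
      refine ⟨by omega, IH.2.1, IH.2.2.1, ?_⟩
      intro m h1 h2 hpre
      rcases Nat.eq_or_lt_of_le h1 with h | h
      · exact hs ((PySem.Chars.startswith_iff _ _).2 (h ▸ hpre))
      · exact IH.2.2.2 m h h2 hpre
  · exact ⟨le_refl _, by omega, fun h => by omega, fun m h1 h2 => by omega⟩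
termination_by cs.length - j

-- the closing condition of B's qualified-field scan, as a predicate
def pvCloseAt (cs dl ql : List Char) (m : Nat) : Prop :=
  PySem.Chars.startswith (cs.drop m) ql = true ∧
    (m + ql.length = cs.length ∨ PySem.Chars.startswith (cs.drop (m + ql.length)) dl = true)

theorem pvB_close_spec (cs dl ql : List Char) (j : Nat) (hj : j ≤ cs.length) :
    j ≤ pvB_close cs dl ql j ∧ pvB_close cs dl ql j ≤ cs.length ∧
    (pvB_close cs dl ql j < cs.length → pvCloseAt cs dl ql (pvB_close cs dl ql j)) ∧
    (∀ m, j ≤ m → m < pvB_close cs dl ql j → ¬ pvCloseAt cs dl ql m) := by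
  unfold pvB_close
  split
  · rename_i h
    by_cases hs : pvCloseAt cs dl ql j
    · rw [if_pos ⟨hs.1, hs.2⟩]
      exact ⟨le_refl _, by omega, fun _ => hs, fun m h1 h2 => by omega⟩
    · rw [if_neg (fun hc => hs ⟨hc.1, hc.2⟩)]
      have IH := pvB_close_spec cs dl ql (j + 1) (by omega)
      refine ⟨by omega, IH.2.1, IH.2.2.1, ?_⟩
      intro m h1 h2 hc
      rcases Nat.eq_or_lt_of_le h1 with h | h
      · exact hs (h ▸ hc)
      · exact IH.2.2.2 m h h2 hc
  · exact ⟨le_refl _, by omega, fun h => by omega, fun m h1 h2 => by omega⟩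
termination_by cs.length - j

-- ----- single-character views of the predicates -----

def pvGoodC (cs : List Char) (d q : Char) (m : Nat) : Prop :=
  cs[m]? = some q ∧ (m = cs.length - 1 ∨ cs[m + 1]? = some d)

theorem pv_goodAt_iff (cs : List Char) (d q : Char) (r : Nat) :
    pvGoodAt cs [d] [q] r ↔ pvGoodC cs d q r := by
  simp [pvGoodAt, pvGoodC, pv_prefix_drop]

theorem pv_closeAt_iff (cs : List Char) (d q : Char) (m : Nat) :
    pvCloseAt cs [d] [q] m ↔ pvGoodC cs d q m := by
  unfold pvCloseAt pvGoodC
  simp only [PySem.Chars.startswith_iff, pv_prefix_drop, List.length_cons, List.length_nil]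
  constructor
  · rintro ⟨h1, h2⟩
    have hm : m < cs.length := (List.getElem?_eq_some_iff.mp h1).1
    refine ⟨h1, ?_⟩
    rcases h2 with h | h
    · left; omega
    · right; simpa using h
  · rintro ⟨h1, h2⟩
    have hm : m < cs.length := (List.getElem?_eq_some_iff.mp h1).1
    refine ⟨h1, ?_⟩
    rcases h2 with h | h
    · left; omega
    · right; simpa using h

-- ----- A's inner while-loop, characterized on Pre_ inputs -----

theorem pvA_inner_exit (cs : List Char) (d q : Char) (h0 : cs[0]? = some d) :
    ∀ fuel, 1 ≤ fuel → pvA_inner cs [d] [q] fuel (-1) = -1 := by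
  intro fuel hf
  cases fuel with
  | zero => omega
  | succ f =>
    show pvA_inner cs [d] [q] (f + 1) (-1) = -1
    have hn : 0 < cs.length := (List.getElem?_eq_some_iff.mp h0).1
    simp only [pvA_inner]
    rw [if_pos (show (-1 : Int) < (cs.length : Int) - 1 by omega)]
    have : (-1 : Int) + 1 = ((0 : Nat) : Int) := by omega
    rw [this, PySem.List.pyGet?_natCast, h0]
    rw [if_neg (by simp)]

theorem pvA_inner_found (cs : List Char) (d q : Char) (g : Nat) (hGg : pvGoodC cs d q g) :
    ∀ fuel (e : Int), 0 ≤ e → cs[e.toNat]? = some q → e.toNat ≤ g →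
      (∀ m, e.toNat ≤ m → m < g → cs[m]? = some q → ¬ pvGoodC cs d q m) →
      g - e.toNat < fuel →
      pvA_inner cs [d] [q] fuel e = (g : Int) := by
  intro fuel
  induction fuel with
  | zero => intro e _ _ _ _ hfuel; omega
  | succ f IH =>
    intro e he0 heq heg hmin hfuel
    have hgn : g < cs.length := (List.getElem?_eq_some_iff.mp hGg.1).1
    have hen : e.toNat < cs.length := (List.getElem?_eq_some_iff.mp heq).1
    rcases Nat.eq_or_lt_of_le heg with hegq | hlt
    · -- e is already the closing position
      subst hegq
      rcases hGg.2 with hend | hd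
      · -- g = n - 1 : the loop guard is false
        simp only [pvA_inner]
        rw [if_neg (by omega)]
        omega
      · -- cs[g+1] = d
        by_cases hend : e.toNat = cs.length - 1
        · simp only [pvA_inner]
          rw [if_neg (by omega)]
          omega
        · simp only [pvA_inner]
          rw [if_pos (by omega)]
          have hcast : e + 1 = ((e.toNat + 1 : Nat) : Int) := by omega
          rw [hcast, PySem.List.pyGet?_natCast, hd]
          rw [if_neg (by simp)]
          omega
    · -- e is a non-closing qualifier position: step to the next qualifier
      have hne : ¬ pvGoodC cs d q e.toNat := hmin e.toNat (le_refl _) hlt heq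
      have hnend : e.toNat ≠ cs.length - 1 := fun h => hne ⟨heq, Or.inl h⟩
      have hnd : cs[e.toNat + 1]? ≠ some d := fun h => hne ⟨heq, Or.inr h⟩
      simp only [pvA_inner]
      rw [if_pos (by omega)]
      have hcast : e + 1 = ((e.toNat + 1 : Nat) : Int) := by omega
      rw [hcast, PySem.List.pyGet?_natCast]
      have hlt1 : e.toNat + 1 < cs.length := by omega
      obtain ⟨c, hc⟩ : ∃ c, cs[e.toNat + 1]? = some c := ⟨cs[e.toNat + 1], List.getElem?_eq_getElem hlt1⟩
      rw [hc]
      have hcond : Option.map (fun x => [x]) (some c) ≠ (some [d] : Option (List Char)) := by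
        simp only [Option.map_some, ne_eq, Option.some.injEq, List.cons.injEq, and_true]
        exact fun h => hnd (h ▸ hc)
      rw [if_pos hcond]
      -- the next qualifier occurrence
      have hk : e.toNat + 1 ≤ cs.length := by omega
      have hspec := pv_findFrom_spec cs [q] (e.toNat + 1) hk
      set e' := PySem.Chars.findFrom cs [q] ((e.toNat + 1 : Nat) : Int) with he'
      have hgq : [q] <+: cs.drop g := pv_prefix_drop.mpr hGg.1
      have h0le : 0 ≤ e' := by
        by_contra hneg
        exact ((hspec.1 (by omega)).2 g (by omega) hgq)
      obtain ⟨hk1, hk2, hk3, hk4⟩ := hspec.2 h0le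
      have hq' : cs[e'.toNat]? = some q := pv_prefix_drop.mp hk3
      have he'g : e'.toNat ≤ g := by
        by_contra hgt
        exact hk4 g (by omega) (by omega) hgq
      refine IH e' h0le hq' he'g ?_ (by omega)
      intro m h1 h2 h3
      exact hmin m (by omega) h2 h3

theorem pvA_inner_nogood (cs : List Char) (d q : Char) (lb : Nat) (h0 : cs[0]? = some d)
    (hng : ∀ m, lb ≤ m → cs[m]? = some q → ¬ pvGoodC cs d q m) :
    ∀ fuel (e : Int), 0 ≤ e → lb ≤ e.toNat → cs[e.toNat]? = some q →
      cs.length - e.toNat < fuel →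
      pvA_inner cs [d] [q] fuel e = -1 := by
  intro fuel
  induction fuel with
  | zero => intro e _ _ he _; have := (List.getElem?_eq_some_iff.mp he).1; omega
  | succ f IH =>
    intro e he0 helb heq hfuel
    have hen : e.toNat < cs.length := (List.getElem?_eq_some_iff.mp heq).1
    have hne : ¬ pvGoodC cs d q e.toNat := hng e.toNat helb heq
    have hnend : e.toNat ≠ cs.length - 1 := fun h => hne ⟨heq, Or.inl h⟩
    have hnd : cs[e.toNat + 1]? ≠ some d := fun h => hne ⟨heq, Or.inr h⟩
    simp only [pvA_inner]
    rw [if_pos (by omega)]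
    have hcast : e + 1 = ((e.toNat + 1 : Nat) : Int) := by omega
    rw [hcast, PySem.List.pyGet?_natCast]
    have hlt1 : e.toNat + 1 < cs.length := by omega
    obtain ⟨c, hc⟩ : ∃ c, cs[e.toNat + 1]? = some c := ⟨cs[e.toNat + 1], List.getElem?_eq_getElem hlt1⟩
    rw [hc]
    have hcond : Option.map (fun x => [x]) (some c) ≠ (some [d] : Option (List Char)) := by
      simp only [Option.map_some, ne_eq, Option.some.injEq, List.cons.injEq, and_true]
      exact fun h => hnd (h ▸ hc)
    rw [if_pos hcond]
    have hk : e.toNat + 1 ≤ cs.length := by omega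
    have hspec := pv_findFrom_spec cs [q] (e.toNat + 1) hk
    set e' := PySem.Chars.findFrom cs [q] ((e.toNat + 1 : Nat) : Int) with he'
    by_cases h0le : 0 ≤ e'
    · obtain ⟨hk1, hk2, hk3, hk4⟩ := hspec.2 h0le
      have hq' : cs[e'.toNat]? = some q := pv_prefix_drop.mp hk3
      exact IH e' h0le (by omega) hq' (by omega)
    · rw [(hspec.1 (by omega)).1]
      exact pvA_inner_exit cs d q h0 f (by omega)

-- ----- the branch condition of A matches the branch condition of B -----

theorem pv_branch_iff (cs ql : List Char) (i : Nat) :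
    (PySem.Chars.slice cs (some (i : Int)) (some ((i : Int) + (ql.length : Int))) = ql)
      ↔ ql <+: cs.drop i := by
  have hcast : (i : Int) + (ql.length : Int) = ((i + ql.length : Nat) : Int) := by push_cast; ring
  rw [hcast, PySem.Chars.slice_eq_listSlice, PySem.List.slice_natCast]
  have h2 : i + ql.length - i = ql.length := by omega
  rw [h2, eq_comm, ← List.prefix_iff_eq_take]

-- ----- the outer loops agree -----

theorem pv_main (cs dl ql : List Char) (hqne : ql ≠ [])
    (hpre : ∀ p < cs.length, pvOpens cs dl ql p →
      dl.length = 1 ∧ ql.length = 1 ∧ ¬ pvGoodAt cs dl ql (p + 1) ∧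
      (dl <+: cs ∨ ∃ r < cs.length, p + 2 ≤ r ∧ pvGoodAt cs dl ql r)) :
    ∀ fuel (i : Nat) (items : List String) (quals : List Bool),
      cs.length < i + fuel →
      (i < cs.length → (i = 0 ∨ (dl.length ≤ i ∧ dl <+: cs.drop (i - dl.length)))) →
      pvA_loop cs dl ql fuel (i : Int) items quals = pvB_loop cs dl ql i items quals := by
  classical
  intro fuel
  induction fuel with
  | zero =>
    intro i items quals hfuel hinv
    rw [pvB_loop, dif_neg (by omega)]
    rfl
  | succ f IH =>
    intro i items quals hfuel hinv
    by_cases hin : i < cs.length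
    · by_cases hq : ql <+: cs.drop i
      · -- ===== qualified field =====
        obtain ⟨hd1, hq1, hngA, hdisj⟩ := hpre i hin ⟨hq, hinv hin⟩
        obtain ⟨d, hd⟩ := List.length_eq_one_iff.mp hd1
        obtain ⟨qc, hqc⟩ := List.length_eq_one_iff.mp hq1
        subst hd hqc
        have hng : ¬ pvGoodC cs d qc (i + 1) := fun h => hngA ((pv_goodAt_iff cs d qc (i + 1)).mpr h)
        have hiq : cs[i]? = some qc := pv_prefix_drop.mp hq
        simp only [pvA_loop]
        rw [pvB_loop]
        rw [dif_pos hin]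
        rw [if_pos (show (i : Int) < (cs.length : Int) by exact_mod_cast hin)]
        rw [if_pos ((pv_branch_iff cs [qc] i).mpr hq)]
        rw [dif_pos (⟨by simp, (PySem.Chars.startswith_iff _ _).2 hq⟩ :
          ([qc] : List Char).length ≠ 0 ∧ PySem.Chars.startswith (cs.drop i) [qc] = true)]
        have hcast2 : (i : Int) + 1 + 1 = ((i + 2 : Nat) : Int) := by push_cast; ring
        rw [hcast2]
        have hcast1 : (i : Int) + 1 = ((i + 1 : Nat) : Int) := by push_cast; ring
        have hjspec := pvB_close_spec cs [d] [qc] (i + 1) (by omega)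
        by_cases hex : ∃ r, i + 2 ≤ r ∧ pvGoodC cs d qc r
        · -- a later closing qualifier exists: both sides stop at the first one
          set g := Nat.find hex with hg
          obtain ⟨hgge, hGg⟩ := Nat.find_spec hex
          have hgmin : ∀ m, m < g → ¬ (i + 2 ≤ m ∧ pvGoodC cs d qc m) := fun m hm => Nat.find_min hex hm
          have hgn : g < cs.length := (List.getElem?_eq_some_iff.mp hGg.1).1
          have hgq : [qc] <+: cs.drop g := pv_prefix_drop.mpr hGg.1
          have hk2n : i + 2 ≤ cs.length := by omega
          have hfspec := pv_findFrom_spec cs [qc] (i + 2) hk2n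
          set e0 := PySem.Chars.findFrom cs [qc] ((i + 2 : Nat) : Int) with he0
          have h00 : 0 ≤ e0 := by
            by_contra hneg
            exact (hfspec.1 (by omega)).2 g (by omega) hgq
          obtain ⟨hk1, hk2, hk3, hk4⟩ := hfspec.2 h00
          have he0g : e0.toNat ≤ g := by
            by_contra hgt
            exact hk4 g (by omega) (by omega) hgq
          have hinner : pvA_inner cs [d] [qc] (2 * cs.length + 4) e0 = (g : Int) := by
            refine pvA_inner_found cs d qc g hGg _ e0 h00 (pv_prefix_drop.mp hk3) he0g ?_ (by omega)
            intro m h1 h2 h3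
            exact fun hGm => hgmin m h2 ⟨by omega, hGm⟩
          rw [hinner]
          rw [if_neg (show ¬ (g : Int) < 0 by omega)]
          -- B stops at the same position
          have hjeq : pvB_close cs [d] [qc] (i + 1) = g := by
            have h1 : ¬ (pvB_close cs [d] [qc] (i + 1) < g) := by
              intro hlt
              have hjlt : pvB_close cs [d] [qc] (i + 1) < cs.length := by omega
              have hGj := (pv_closeAt_iff cs d qc _).mp (hjspec.2.2.1 hjlt)
              rcases Nat.eq_or_lt_of_le hjspec.1 with h | h
              · exact hng (h ▸ hGj)
              · exact hgmin _ hlt ⟨by omega, hGj⟩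
            have h2 : ¬ (g < pvB_close cs [d] [qc] (i + 1)) := fun hlt =>
              hjspec.2.2.2 g (by omega) hlt ((pv_closeAt_iff cs d qc g).mpr hGg)
            omega
          simp only [List.length_singleton]
          rw [hjeq]
          -- the two appended fields coincide
          rw [hcast1, PySem.Chars.slice_eq_listSlice, PySem.List.slice_natCast]
          -- next start positions coincide
          have hnext : (g : Int) + ((([qc] : List Char) ++ [d]).length : Int) = ((g + 1 + 1 : Nat) : Int) := by
            simp only [List.length_append, List.length_singleton]
            push_cast; ring
          rw [hnext]
          refine IH (g + 1 + 1) _ _ (by omega) ?_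
          intro hlt
          right
          refine ⟨by simp, ?_⟩
          have hstep : g + 1 + 1 - ([d] : List Char).length = g + 1 := by simp
          rw [hstep]
          rcases hGg.2 with h | h
          · omega
          · exact pv_prefix_drop.mpr h
        · -- no later closing qualifier: A exits through find = -1, B scans to the end
          have hd0 : ([d] : List Char) <+: cs := by
            rcases hdisj with h | ⟨r, hr, hr2, hr3⟩
            · exact h
            · exact absurd ⟨r, hr2, (pv_goodAt_iff cs d qc r).mp hr3⟩ hex
          have h0 : cs[0]? = some d := pv_prefix_drop.mp (by simpa using hd0)
          have hnogood : ∀ m, i + 2 ≤ m → cs[m]? = some qc → ¬ pvGoodC cs d qc m :=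
            fun m hm _ hG => hex ⟨m, hm, hG⟩
          have hinner : pvA_inner cs [d] [qc] (2 * cs.length + 4)
              (PySem.Chars.findFrom cs [qc] ((i + 2 : Nat) : Int)) = -1 := by
            by_cases hi2 : i + 2 ≤ cs.length
            · have hfspec := pv_findFrom_spec cs [qc] (i + 2) hi2
              by_cases h00 : 0 ≤ PySem.Chars.findFrom cs [qc] ((i + 2 : Nat) : Int)
              · obtain ⟨hk1, hk2, hk3, hk4⟩ := hfspec.2 h00
                exact pvA_inner_nogood cs d qc (i + 2) h0 hnogood _ _ h00 hk1
                  (pv_prefix_drop.mp hk3) (by omega)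
              · rw [(hfspec.1 (by omega)).1]
                exact pvA_inner_exit cs d qc h0 _ (by omega)
            · rw [pv_findFrom_past cs [qc] _ (by exact_mod_cast (by omega : cs.length < i + 2))]
              exact pvA_inner_exit cs d qc h0 _ (by omega)
          rw [hinner]
          rw [if_pos (show (-1 : Int) < 0 by omega)]
          have hjeq : pvB_close cs [d] [qc] (i + 1) = cs.length := by
            by_contra hne'
            have hjlt : pvB_close cs [d] [qc] (i + 1) < cs.length :=
              lt_of_le_of_ne hjspec.2.1 hne'
            have hGj := (pv_closeAt_iff cs d qc _).mp (hjspec.2.2.1 hjlt)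
            rcases Nat.eq_or_lt_of_le hjspec.1 with h | h
            · exact hng (h ▸ hGj)
            · exact hnogood _ (by omega) hGj.1 hGj
          simp only [List.length_singleton]
          rw [hjeq]
          rw [hcast1, PySem.Chars.slice_eq_listSlice]
          rw [show ((cs.length : Nat) : Int) = ((cs.length : Nat) : Int) from rfl]
          rw [PySem.List.slice_natCast]
          have hnext : ((cs.length : Nat) : Int) + ((([qc] : List Char) ++ [d]).length : Int) =
              ((cs.length + 1 + 1 : Nat) : Int) := by
            simp only [List.length_append, List.length_singleton]
            push_cast; ring
          rw [hnext]
          exact IH (cs.length + 1 + 1) _ _ (by omega) (fun hlt => absurd hlt (by omega))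
      · -- ===== unqualified field =====
        simp only [pvA_loop]
        rw [pvB_loop]
        rw [dif_pos hin]
        rw [if_pos (show (i : Int) < (cs.length : Int) by exact_mod_cast hin)]
        rw [if_neg (fun hcontra => hq ((pv_branch_iff cs ql i).mp hcontra))]
        rw [dif_neg (fun hb => hq ((PySem.Chars.startswith_iff _ _).1 hb.2))]
        have hcast1 : (i : Int) + 1 = ((i + 1 : Nat) : Int) := by push_cast; ring
        rw [hcast1]
        have hk : i + 1 ≤ cs.length := by omega
        have hfspec := pv_findFrom_spec cs dl (i + 1) hk
        have hjspec := pvB_delim_spec cs dl (i + 1) hk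
        set j := pvB_delim cs dl (i + 1) with hjdef
        set e0 := PySem.Chars.findFrom cs dl ((i + 1 : Nat) : Int) with he0
        have hcommon : ∀ (v : Nat), v = j →
            pvA_loop cs dl ql f ((v : Int) + (dl.length : Int))
              (items ++ [String.ofList (PySem.Chars.slice cs (some ((i : Nat) : Int)) (some ((v : Nat) : Int)))])
              (quals ++ [false]) =
            pvB_loop cs dl ql (j + dl.length)
              (items ++ [String.ofList (List.take (j - i) (List.drop i cs))]) (quals ++ [false]) := by
          intro v hv
          subst hv
          rw [PySem.Chars.slice_eq_listSlice, PySem.List.slice_natCast]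
          have hnext : ((j : Nat) : Int) + (dl.length : Int) = ((j + dl.length : Nat) : Int) := by
            push_cast; ring
          rw [hnext]
          refine IH (j + dl.length) _ _ (by omega) ?_
          intro hlt
          right
          refine ⟨by omega, ?_⟩
          have hstep : j + dl.length - dl.length = j := by omega
          rw [hstep]
          exact hjspec.2.2.1 (by omega)
        by_cases h0 : e0 < 0
        · have hjn : j = cs.length := by
            by_contra hne'
            have hjlt : j < cs.length := lt_of_le_of_ne hjspec.2.1 hne'
            exact (hfspec.1 h0).2 j hjspec.1 (hjspec.2.2.1 hjlt)
          rw [if_pos h0]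
          exact hcommon cs.length hjn.symm
        · obtain ⟨hk1, hk2, hk3, hk4⟩ := hfspec.2 (by omega)
          have hje : j = e0.toNat := by
            have h1 : ¬ (j < e0.toNat) := fun hlt => hk4 j hjspec.1 hlt (hjspec.2.2.1 (by omega))
            have h2 : ¬ (e0.toNat < j) := fun hlt => hjspec.2.2.2 e0.toNat hk1 hlt hk3
            omega
          rw [if_neg h0]
          have he0e : e0 = ((e0.toNat : Nat) : Int) := by omega
          rw [he0e]
          exact hcommon e0.toNat hje.symm
    · -- i ≥ n : both loops stop
      simp only [pvA_loop]
      rw [pvB_loop, dif_neg hin]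
      rw [if_neg (show ¬ (i : Int) < (cs.length : Int) by exact_mod_cast hin)]

-- ===== VERDICT (by name: the statement is the Claim_ definition above) =====
theorem split_line_qualifier_spec : Claim_equal_split_line_qualifier := by
  intro line delimiter qualifier hDom hPre
  obtain ⟨hqne, hpre⟩ := hPre
  unfold Spec_split_line_qualifier split_line_qualifier split_line_qualifier_alt
  have h := pv_main line.toList delimiter.toList qualifier.toList hqne hpre
    (line.toList.length + 2) 0 [] [] (by omega) (by intro _; left; rfl)
  simpa using h
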